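-- pv_equiv track=rewrite | github.com/EraCat/hse_cbab2025_hw | src/python/contest_1.py | zigzag_decode
-- ===== SOURCE A (Python) =====
-- def varint_decode(byte_arr) -> list[int | None]:
--     if len(byte_arr) == 0:
--         return []
--
--     result = []
--     val = 0
--     shift = 0
--     in_number = False
--
--     for b in byte_arr:
--         in_number = True
--         val |= (b & 0x7F) << shift
--         if b & 0x80:
--             shift += 7
--         else:
--             result.append(val)
--             val = 0
--             shift = 0
--             in_number = False
--
--     if in_number:
--         result.append(None)
--
--     return result
--
-- def zigzag_decode(byte_arr):
--     decoded = varint_decode(byte_arr)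
--
--     for i in range(len(decoded)):
--         if decoded[i] is not None:
--             if decoded[i] % 2 == 0:
--                 decoded[i] = decoded[i] // 2
--             else:
--                 decoded[i] = -(decoded[i] + 1) // 2
--
--     return decoded
-- ===== SOURCE B (Python) =====
-- def zigzag_decode(byte_arr):
--     out = []
--     val = 0
--     shift = 0
--     in_number = False
--     for b in byte_arr:
--         if b & 0x80:
--             val |= (b & 0x7F) << shift
--             shift += 7
--             in_number = True
--         else:
--             v = val | ((b & 0x7F) << shift)
--             out.append(v // 2 if v % 2 == 0 else -(v + 1) // 2)
--             val = 0
--             shift = 0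
--             in_number = False
--     if in_number:
--         out.append(None)
--     return out
-- ===== Notes on version B (the rewrite author's own statement) =====
-- stated objective: simpler
-- what changed: B fuses varint decoding and zigzag decoding into one loop over the bytes that emits each decoded integer immediately, dropping the intermediate varint list, the helper function and the in-place index rewrite pass.
import Mathlib
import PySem

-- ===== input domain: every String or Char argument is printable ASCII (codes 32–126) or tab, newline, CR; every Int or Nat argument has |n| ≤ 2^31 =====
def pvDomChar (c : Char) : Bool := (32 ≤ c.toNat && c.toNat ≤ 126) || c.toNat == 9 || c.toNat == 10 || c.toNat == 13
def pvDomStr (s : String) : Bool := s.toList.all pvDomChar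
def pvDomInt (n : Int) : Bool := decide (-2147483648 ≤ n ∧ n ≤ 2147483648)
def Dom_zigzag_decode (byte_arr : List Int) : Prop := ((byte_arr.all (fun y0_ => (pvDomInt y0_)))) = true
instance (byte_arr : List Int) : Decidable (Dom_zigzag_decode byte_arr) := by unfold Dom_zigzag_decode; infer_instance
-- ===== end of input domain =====

-- B fuses A's two passes (varint decode, then zigzag rewrite) into one loop that emits each
-- zigzag-decoded integer as soon as its varint terminates; same return value, no speed claim.

-- ===== PORT A =====
-- varint_decode's loop: state (result, val, shift, in_number); shift only ever grows by 7 from 0, kept as Nat for <<<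
def pvAStep (st : List (Option Int) × Int × Nat × Bool) (b : Int) : List (Option Int) × Int × Nat × Bool :=
  let val := PySem.Int.bor st.2.1 ((PySem.Int.band b 0x7F) <<< st.2.2.1)
  if PySem.Int.band b 0x80 ≠ 0 then (st.1, val, st.2.2.1 + 7, true)
  else (st.1 ++ [some val], 0, 0, false)

def varint_decode (byte_arr : List Int) : List (Option Int) :=
  if byte_arr.length = 0 then []
  else
    let st := byte_arr.foldl pvAStep ([], 0, 0, false)
    if st.2.2.2 then st.1 ++ [none] else st.1

-- the in-place index loop over `decoded` rewrites every non-None entry; ported as an elementwise map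
def pvZig (d : Option Int) : Option Int :=
  match d with
  | none => none
  | some v =>
    if PySem.Int.mod v 2 = 0 then some (PySem.Int.floordiv v 2)
    else some (PySem.Int.floordiv (-(v + 1)) 2)

def zigzag_decode (byte_arr : List Int) : List (Option Int) :=
  (varint_decode byte_arr).map pvZig

-- ===== PORT B =====
def pvBGo (bs : List Int) (val : Int) (shift : Nat) (in_number : Bool) : List (Option Int) :=
  match bs with
  | [] => if in_number then [none] else []
  | b :: rest =>
    if PySem.Int.band b 0x80 ≠ 0 then
      pvBGo rest (PySem.Int.bor val ((PySem.Int.band b 0x7F) <<< shift)) (shift + 7) true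
    else
      let v := PySem.Int.bor val ((PySem.Int.band b 0x7F) <<< shift)
      (if PySem.Int.mod v 2 = 0 then some (PySem.Int.floordiv v 2)
       else some (PySem.Int.floordiv (-(v + 1)) 2)) :: pvBGo rest 0 0 false

def zigzag_decode_alt (byte_arr : List Int) : List (Option Int) :=
  pvBGo byte_arr 0 0 false

-- ===== PRECONDITION & SPEC =====
def Spec_zigzag_decode (byte_arr : List Int) (out : List (Option Int)) : Prop := out = zigzag_decode_alt byte_arr
instance (byte_arr : List Int) (out : List (Option Int)) : Decidable (Spec_zigzag_decode byte_arr out) := by unfold Spec_zigzag_decode; infer_instance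

-- ===== CLAIM (what is proved, stated in full; the proofs are below) =====
def Claim_equal_zigzag_decode : Prop := ∀ (byte_arr : List Int), Dom_zigzag_decode byte_arr → Spec_zigzag_decode byte_arr (zigzag_decode byte_arr)

-- ===== LEMMAS AND PROOFS =====
lemma pvLoop_eq (bs : List Int) : ∀ (res : List (Option Int)) (val : Int) (shift : Nat) (inn : Bool),
    (let st := bs.foldl pvAStep (res, val, shift, inn)
     (if st.2.2.2 then st.1 ++ [none] else st.1)).map pvZig
      = res.map pvZig ++ pvBGo bs val shift inn := by
  induction bs with
  | nil =>
    intro res val shift inn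
    cases inn <;> simp [List.foldl, pvBGo, pvZig]
  | cons b rest ih =>
    intro res val shift inn
    simp only [List.foldl_cons, pvAStep, pvBGo]
    by_cases h : PySem.Int.band b 0x80 ≠ 0
    · rw [if_pos h, if_pos h]
      exact ih res _ _ true
    · rw [if_neg h, if_neg h]
      rw [ih (res ++ [some (PySem.Int.bor val (PySem.Int.band b 0x7F <<< shift))]) 0 0 false]
      simp [pvZig, List.map_append]

theorem zigzag_decode_spec : Claim_equal_zigzag_decode := by
  unfold Claim_equal_zigzag_decode
  intro byte_arr _
  unfold Spec_zigzag_decode zigzag_decode zigzag_decode_alt varint_decode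
  cases byte_arr with
  | nil => simp [pvBGo]
  | cons b rest =>
    simpa using pvLoop_eq (b :: rest) [] 0 0 false
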